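-- pv_equiv track=rewrite | github.com/hackinggrowth/taxonomy-harness | scripts/score_readiness.py | normalized_weights
-- ===== SOURCE A (Python) =====
-- from typing import Any
--
-- DEFAULT_SCORE_WEIGHTS = {"coverage": 30, "clarity": 30, "consistency": 25, "governance": 15}
--
-- def normalized_weights(raw_weights: dict[str, Any] | None) -> dict[str, int]:
--     """Merge user-provided score weights with safe defaults."""
--     weights = DEFAULT_SCORE_WEIGHTS.copy()
--     if not isinstance(raw_weights, dict):
--         return weights
--     for key, value in raw_weights.items():
--         if key not in weights:
--             continue
--         try:
--             parsed = int(value)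
--         except (TypeError, ValueError):
--             continue
--         if parsed >= 0:
--             weights[key] = parsed
--     return weights
-- ===== SOURCE B (Python) =====
-- from typing import Any
--
-- DEFAULT_SCORE_WEIGHTS = {"coverage": 30, "clarity": 30, "consistency": 25, "governance": 15}
--
--
-- def _pick(raw: dict, key: str, default: int) -> int:
--     """The weight for one key: the user's value when present, parseable and >= 0, else the default."""
--     if key not in raw:
--         return default
--     try:
--         parsed = int(raw[key])
--     except (TypeError, ValueError):
--         return default
--     return parsed if parsed >= 0 else default
--
--
-- def normalized_weights(raw_weights: "dict[str, Any] | None") -> "dict[str, int]":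
--     """Merge user-provided score weights with safe defaults."""
--     if not isinstance(raw_weights, dict):
--         return DEFAULT_SCORE_WEIGHTS.copy()
--     return {k: _pick(raw_weights, k, d) for k, d in DEFAULT_SCORE_WEIGHTS.items()}
-- ===== Notes on version B (the rewrite author's own statement) =====
-- stated objective: simpler
-- what changed: B iterates over the four fixed default keys and looks each up in raw_weights (building the result by comprehension), instead of A's loop over raw_weights.items() that mutates a copied defaults dict.
import Mathlib
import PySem

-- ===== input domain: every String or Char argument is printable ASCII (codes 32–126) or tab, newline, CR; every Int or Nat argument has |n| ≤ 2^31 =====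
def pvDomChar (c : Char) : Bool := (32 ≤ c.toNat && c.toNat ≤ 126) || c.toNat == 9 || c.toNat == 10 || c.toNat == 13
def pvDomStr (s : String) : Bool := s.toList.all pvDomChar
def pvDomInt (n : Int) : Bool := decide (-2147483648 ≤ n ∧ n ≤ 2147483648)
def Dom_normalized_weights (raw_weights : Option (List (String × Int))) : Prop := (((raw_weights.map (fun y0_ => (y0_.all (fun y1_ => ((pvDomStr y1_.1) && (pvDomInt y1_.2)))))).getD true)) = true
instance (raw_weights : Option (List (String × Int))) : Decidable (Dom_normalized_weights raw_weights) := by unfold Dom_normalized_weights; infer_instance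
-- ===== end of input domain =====

-- B merges by iterating over the four fixed default keys with a dict lookup into raw_weights,
-- instead of A's loop over raw_weights.items() mutating a copied defaults dict (objective: simpler).

-- ===== PORT A =====
-- DEFAULT_SCORE_WEIGHTS (module constant)
def pvDefaults : List (String × Int) :=
  [("coverage", 30), ("clarity", 30), ("consistency", 25), ("governance", 15)]

-- one iteration of A's loop body: skip keys not already in weights; parsed = int(value)
-- (values are Int under the type convention, so int(value) never raises); overwrite when parsed >= 0
def pvStepA (w : PySem.Dict String Int) (kv : String × Int) : PySem.Dict String Int :=
  if w.contains kv.1 then (if kv.2 ≥ 0 then w.insert kv.1 kv.2 else w) else w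

def normalized_weights (raw_weights : Option (List (String × Int))) : List (String × Int) :=
  let weights := PySem.Dict.ofList pvDefaults   -- DEFAULT_SCORE_WEIGHTS.copy()
  match raw_weights with
  | none => weights.items                       -- not a dict: return the defaults copy
  | some l => (((PySem.Dict.ofList l).items).foldl pvStepA weights).items

-- ===== PORT B =====
-- _pick: the user's value when present and >= 0, else the default
def pvPick (d : PySem.Dict String Int) (key : String) (default : Int) : Int :=
  match d.get? key with                          -- 'key not in raw' / 'raw[key]'
  | none => default
  | some v => if v ≥ 0 then v else default       -- int(raw[key]) is the Int itself

def normalized_weights_alt (raw_weights : Option (List (String × Int))) : List (String × Int) :=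
  match raw_weights with
  | none => pvDefaults
  | some l =>
      let d := PySem.Dict.ofList l
      pvDefaults.map (fun kd => (kd.1, pvPick d kd.1 kd.2))

-- ===== PRECONDITION & SPEC =====
def Spec_normalized_weights (raw_weights : Option (List (String × Int))) (out : List (String × Int)) : Prop := out = normalized_weights_alt raw_weights
instance (raw_weights : Option (List (String × Int))) (out : List (String × Int)) : Decidable (Spec_normalized_weights raw_weights out) := by unfold Spec_normalized_weights; infer_instance

-- ===== CLAIM (what is proved, stated in full; the proofs are below) =====
def Claim_equal_normalized_weights : Prop := ∀ (raw_weights : Option (List (String × Int))), Dom_normalized_weights raw_weights → Spec_normalized_weights raw_weights (normalized_weights raw_weights)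

-- ===== LEMMAS AND PROOFS =====

-- A's loop never changes the key set of `weights` (inserts only at already-contained keys)
theorem pv_keys_fold (L : List (String × Int)) (w : PySem.Dict String Int) :
    (L.foldl pvStepA w).keys = w.keys := by
  induction L generalizing w with
  | nil => rfl
  | cons p rest ih =>
      simp only [List.foldl_cons]
      rw [ih]
      unfold pvStepA
      by_cases hc : w.contains p.1
      · simp [hc]
        split_ifs with h
        · exact PySem.Dict.keys_insert_of_contains w p.2 hc
        · rfl
      · simp [hc]

-- keys absent from the scanned pairs never have their value touched
theorem pv_getD_fold_not_mem (L : List (String × Int)) (w : PySem.Dict String Int)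
    (k : String) (d0 : Int) (h : ∀ p ∈ L, p.1 ≠ k) :
    (L.foldl pvStepA w).getD k d0 = w.getD k d0 := by
  induction L generalizing w with
  | nil => rfl
  | cons p rest ih =>
      simp only [List.foldl_cons]
      rw [ih _ (fun q hq => h q (List.mem_cons_of_mem _ hq))]
      unfold pvStepA
      have hne : k ≠ p.1 := fun e => h p (List.mem_cons_self) e.symm
      split_ifs with h1 h2
      · exact PySem.Dict.getD_insert_of_ne w p.2 d0 hne
      · rfl
      · rfl

-- the value A's loop leaves at key k, when the scanned pairs have distinct keys
theorem pv_getD_fold (L : List (String × Int)) (hL : (L.map (·.1)).Nodup)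
    (w : PySem.Dict String Int) (k : String) (d0 : Int) :
    (L.foldl pvStepA w).getD k d0 =
      match L.find? (fun p => p.1 == k) with
      | some p => if w.contains k = true ∧ p.2 ≥ 0 then p.2 else w.getD k d0
      | none => w.getD k d0 := by
  induction L generalizing w with
  | nil => rfl
  | cons p rest ih =>
      simp only [List.map_cons, List.nodup_cons] at hL
      obtain ⟨hp, hrest⟩ := hL
      by_cases hk : p.1 = k
      · subst hk
        have hnot : ∀ q ∈ rest, q.1 ≠ p.1 := by
          intro q hq e
          exact hp (e ▸ List.mem_map_of_mem hq)
        simp only [List.foldl_cons, List.find?_cons, BEq.rfl]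
        rw [pv_getD_fold_not_mem rest _ _ _ hnot]
        unfold pvStepA
        by_cases hc : w.contains p.1
        · by_cases hv : p.2 ≥ 0
          · simp [hc, hv, PySem.Dict.getD_insert_self]
          · simp [hc, hv]
        · simp [hc]
      · have hb : (p.1 == k) = false := by simp [hk]
        simp only [List.foldl_cons, List.find?_cons, hb]
        rw [ih hrest]
        have hcontains : (pvStepA w p).contains k = w.contains k := by
          unfold pvStepA
          split_ifs with h1 h2
          · rw [PySem.Dict.contains_insert]
            simp [Ne.symm hk]
          · rfl
          · rfl
        have hgetD : (pvStepA w p).getD k d0 = w.getD k d0 := by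
          unfold pvStepA
          split_ifs with h1 h2
          · exact PySem.Dict.getD_insert_of_ne w p.2 d0 (Ne.symm hk)
          · rfl
          · rfl
        rw [hcontains, hgetD]

-- get? on a dict literal is the first match in its items
theorem pv_get?_mk_eq_find? (L : List (String × Int)) (k : String) :
    (PySem.Dict.mk L).get? k = (L.find? (fun p => p.1 == k)).map (·.2) := by
  induction L with
  | nil => rfl
  | cons p rest ih =>
      rw [show (p :: rest) = ((p.1, p.2) :: rest) by rfl]
      rw [PySem.Dict.get?_mk_cons, List.find?_cons]
      by_cases h : p.1 == k
      · simp [h]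
      · simp [h, ih]

-- the final weight A leaves at one default key equals B's pick for that key
theorem pv_key_entry (l : List (String × Int)) (k : String) (dv : Int)
    (hk : (PySem.Dict.ofList pvDefaults).contains k = true)
    (hd : (PySem.Dict.ofList pvDefaults).getD k 0 = dv) :
    (((PySem.Dict.ofList l).items).foldl pvStepA (PySem.Dict.ofList pvDefaults)).getD k 0 =
      pvPick (PySem.Dict.ofList l) k dv := by
  set d := PySem.Dict.ofList l with hdd
  have hnd : (d.items.map (·.1)).Nodup := PySem.Dict.nodup_keys_ofList l
  rw [pv_getD_fold _ hnd]
  have hmk : PySem.Dict.mk d.items = d := PySem.Dict.ext rfl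
  have hget : d.get? k = (d.items.find? (fun p => p.1 == k)).map (·.2) := by
    rw [← hmk]; exact pv_get?_mk_eq_find? d.items k
  unfold pvPick
  rw [hget]
  cases hfind : d.items.find? (fun p => p.1 == k) with
  | none => simp [hd]
  | some p => simp [hk, hd]

-- ===== VERDICT (by name: the statement is the Claim_ definition above) =====
theorem normalized_weights_spec : Claim_equal_normalized_weights := by
  intro raw_weights _
  unfold Spec_normalized_weights
  match raw_weights with
  | none => decide
  | some l =>
      show (((PySem.Dict.ofList l).items).foldl pvStepA (PySem.Dict.ofList pvDefaults)).items = _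
      set W := ((PySem.Dict.ofList l).items).foldl pvStepA (PySem.Dict.ofList pvDefaults) with hW
      have hkeys : W.keys = ["coverage", "clarity", "consistency", "governance"] := by
        rw [hW, pv_keys_fold]; decide
      have hnd : W.keys.Nodup := by rw [hkeys]; decide
      have hitems : W.items = W.keys.map (fun k => (k, W.getD k 0)) :=
        PySem.Dict.items_eq_map_keys W hnd 0
      rw [hitems, hkeys]
      simp only [List.map_cons, List.map_nil]
      rw [hW, pv_key_entry l "coverage" 30 (by decide) (by decide),
          pv_key_entry l "clarity" 30 (by decide) (by decide),
          pv_key_entry l "consistency" 25 (by decide) (by decide),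
          pv_key_entry l "governance" 15 (by decide) (by decide)]
      rfl
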